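-- pv_equiv track=rewrite | github.com/tareksanger/COMP3007 | recursion/recusion_with_strings.py | index_of_left_most_vowel
-- ===== SOURCE A (Python) =====
-- def index_of_left_most_vowel(word):
--     if not word:
--         return 0
--     if word[0] == 'a' or word[0] == 'e' or word[0] == 'i' or word[0] == 'o' or  word[0] == 'u':
--         word = word[0]
--         return index_of_left_most_vowel(word[1:])
--     else:
--         return 1 + index_of_left_most_vowel(word[1:])
-- ===== SOURCE B (Python) =====
-- def index_of_left_most_vowel(word):
--     found = [i for i in (word.find(v) for v in "aeiou") if i >= 0]
--     if not found:
--         return len(word)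
--     return min(found)
-- ===== Notes on version B (the rewrite author's own statement) =====
-- stated objective: alternative
-- what changed: Replaces A's char-by-char recursion (with slicing) by five independent per-vowel str.find scans whose non-negative results are combined with min, falling back to len(word).
import Mathlib
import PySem

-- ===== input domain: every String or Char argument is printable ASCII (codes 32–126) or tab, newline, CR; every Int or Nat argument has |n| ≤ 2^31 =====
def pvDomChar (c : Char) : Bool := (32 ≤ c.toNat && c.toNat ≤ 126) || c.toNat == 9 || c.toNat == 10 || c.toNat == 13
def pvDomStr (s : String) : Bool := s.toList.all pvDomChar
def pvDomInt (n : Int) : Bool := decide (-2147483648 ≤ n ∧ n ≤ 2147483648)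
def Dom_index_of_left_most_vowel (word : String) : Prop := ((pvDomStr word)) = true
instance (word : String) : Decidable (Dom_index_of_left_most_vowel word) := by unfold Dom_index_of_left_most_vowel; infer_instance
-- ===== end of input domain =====

-- B replaces A's char-by-char recursive scan with five per-vowel str.find scans combined by min (objective: alternative decomposition).

-- ===== PORT A =====
-- literal port of A's recursion over the characters; 'word = word[0]; word[1:]' is kept as List.drop 1 [c]
def pvGoA : List Char → Int
  | [] => 0
  | c :: rest =>
    if c = 'a' ∨ c = 'e' ∨ c = 'i' ∨ c = 'o' ∨ c = 'u' then
      pvGoA (List.drop 1 [c])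
    else
      1 + pvGoA rest

def index_of_left_most_vowel (word : String) : Int := pvGoA word.toList

-- ===== PORT B =====
def index_of_left_most_vowel_alt (word : String) : Int :=
  let found := ((['a','e','i','o','u'].map
      (fun v => PySem.Str.find word (String.ofList [v]))).filter (fun i => decide (0 ≤ i)))
  match PySem.List.min? found (fun x => x) with
  | none => PySem.Str.len word
  | some m => m

-- ===== PRECONDITION & SPEC =====
def Spec_index_of_left_most_vowel (word : String) (out : Int) : Prop := out = index_of_left_most_vowel_alt word
instance (word : String) (out : Int) : Decidable (Spec_index_of_left_most_vowel word out) := by unfold Spec_index_of_left_most_vowel; infer_instance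

-- ===== CLAIM (what is proved, stated in full; the proofs are below) =====
def Claim_equal_index_of_left_most_vowel : Prop := ∀ (word : String), Dom_index_of_left_most_vowel word → Spec_index_of_left_most_vowel word (index_of_left_most_vowel word)

-- ===== LEMMAS AND PROOFS =====

-- first index of the single char v in l, or -1
def pvFirstIdx : List Char → Char → Int
  | [], _ => -1
  | c :: t, v => if c = v then 0 else (if pvFirstIdx t v = -1 then -1 else pvFirstIdx t v + 1)

theorem pvFirstIdx_cases (l : List Char) (v : Char) :
    pvFirstIdx l v = -1 ∨ 0 ≤ pvFirstIdx l v := by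
  induction l with
  | nil => left; rfl
  | cons c t ih =>
    simp only [pvFirstIdx]
    split_ifs with h1 h2
    · right; norm_num
    · left; rfl
    · right; rcases ih with h | h
      · exact absurd h h2
      · omega

theorem pv_go_single (v : Char) (l : List Char) (k : Nat) :
    PySem.Chars.find.go [v] l k =
      (if pvFirstIdx l v = -1 then -1 else pvFirstIdx l v + k) := by
  induction l generalizing k with
  | nil => simp [PySem.Chars.find.go, pvFirstIdx]
  | cons c t ih =>
    have hpref : ([v].isPrefixOf (c :: t)) = (v == c) := by
      simp [List.isPrefixOf]
    by_cases hv : c = v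
    · subst hv
      simp [PySem.Chars.find.go, hpref, pvFirstIdx]
    · have hne : (v == c) = false := by
        simp; intro h; exact hv h.symm
      rw [show PySem.Chars.find.go [v] (c :: t) k =
            (if [v].isPrefixOf (c :: t) then (k : Int) else PySem.Chars.find.go [v] t (k + 1)) from rfl]
      rw [hpref, hne]
      simp only [if_false, Bool.false_eq_true]
      rw [ih]
      rcases pvFirstIdx_cases t v with h | h
      · simp [pvFirstIdx, hv, h]
      · have hne1 : pvFirstIdx t v ≠ -1 := by omega
        simp only [pvFirstIdx, hv, ite_false, hne1]
        have h1 : ¬ (pvFirstIdx t v + 1 = -1) := by omega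
        simp only [h1, ite_false]
        push_cast
        ring

theorem pv_find_single (l : List Char) (v : Char) :
    PySem.Chars.find l [v] = pvFirstIdx l v := by
  rw [show PySem.Chars.find l [v] = PySem.Chars.find.go [v] l 0 from rfl, pv_go_single]
  rcases pvFirstIdx_cases l v with h | h
  · simp [h]
  · have : pvFirstIdx l v ≠ -1 := by omega
    simp [this]

-- list-level body of B
def pvAltL (l : List Char) : Int :=
  match PySem.List.min?
      ((['a','e','i','o','u'].map (fun v => pvFirstIdx l v)).filter (fun i => decide (0 ≤ i)))
      (fun x => x) with
  | none => (l.length : Int)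
  | some m => m

theorem pv_foldl_min_map_add_one (t : List Int) (x : Int) :
    (t.map (fun y => y + 1)).foldl min (x + 1) = t.foldl min x + 1 := by
  induction t generalizing x with
  | nil => rfl
  | cons y r ih =>
    simp only [List.map_cons, List.foldl_cons]
    rw [show min (x + 1) (y + 1) = min x y + 1 by omega]
    exact ih (min x y)

theorem pv_min?_map_add_one (xs : List Int) :
    PySem.List.min? (xs.map (fun x => x + 1)) (fun x => x)
      = Option.map (fun x => x + 1) (PySem.List.min? xs (fun x => x)) := by
  cases xs with
  | nil => rfl
  | cons x t =>
    rw [show (x :: t).map (fun y => y + 1) = (x + 1) :: t.map (fun y => y + 1) from rfl]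
    rw [PySem.List.min?_id_cons, PySem.List.min?_id_cons, pv_foldl_min_map_add_one]
    rfl

theorem pv_filter_shift (ys : List Int) (h : ∀ y ∈ ys, y = -1 ∨ 0 ≤ y) :
    ((ys.map (fun y => if y = -1 then -1 else y + 1)).filter (fun i => decide (0 ≤ i)))
      = (ys.filter (fun i => decide (0 ≤ i))).map (fun y => y + 1) := by
  induction ys with
  | nil => rfl
  | cons y t ih =>
    have hy := h y (List.mem_cons_self ..)
    have ht := ih (fun z hz => h z (List.mem_cons_of_mem _ hz))
    rcases hy with hy | hy
    · subst hy
      simp [ht]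
    · have hne : y ≠ -1 := by omega
      have h1 : (0 : Int) ≤ y + 1 := by omega
      simp [hne, hy, h1, ht]

theorem pv_altL_eq_goA (l : List Char) : pvAltL l = pvGoA l := by
  induction l with
  | nil => simp [pvAltL, pvGoA, pvFirstIdx, PySem.List.min?]
  | cons c t ih =>
    by_cases hv : c = 'a' ∨ c = 'e' ∨ c = 'i' ∨ c = 'o' ∨ c = 'u'
    · -- A returns 0; B's found list contains 0 and all its elements are ≥ 0
      have hA : pvGoA (c :: t) = 0 := by simp [pvGoA, hv]
      rw [hA]
      have hcmem : c ∈ ['a','e','i','o','u'] := by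
        rcases hv with h | h | h | h | h <;> simp [h]
      have h0fi : pvFirstIdx (c :: t) c = 0 := by simp [pvFirstIdx]
      have h0mem : (0 : Int) ∈ ((['a','e','i','o','u'].map
          (fun v => pvFirstIdx (c :: t) v)).filter (fun i => decide (0 ≤ i))) := by
        rw [List.mem_filter]
        refine ⟨List.mem_map.mpr ⟨c, hcmem, h0fi⟩, by decide⟩
      unfold pvAltL
      rcases hmin : PySem.List.min?
          ((['a','e','i','o','u'].map (fun v => pvFirstIdx (c :: t) v)).filter
            (fun i => decide (0 ≤ i))) (fun x => x) with _ | m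
      · exfalso
        have := (PySem.List.min?_eq_none_iff _ _).mp hmin
        rw [this] at h0mem; exact absurd h0mem (List.not_mem_nil)
      · have hm_mem := PySem.List.min?_mem hmin
        have hm_nonneg : 0 ≤ m := by
          have := (List.mem_filter.mp hm_mem).2
          simpa using this
        have hm_le := PySem.List.min?_isMin hmin 0 h0mem
        simp only []
        omega
    · -- c is not a vowel: each per-vowel index shifts by one
      have hshift : ∀ v ∈ ['a','e','i','o','u'],
          pvFirstIdx (c :: t) v = (fun y => if y = -1 then -1 else y + 1) (pvFirstIdx t v) := by
        intro v hvm
        have hcv : c ≠ v := by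
          intro h; subst h
          exact hv (by fin_cases hvm <;> simp_all)
        simp [pvFirstIdx, hcv]
      have hmap : (['a','e','i','o','u'].map (fun v => pvFirstIdx (c :: t) v))
          = ((['a','e','i','o','u'].map (fun v => pvFirstIdx t v)).map
              (fun y => if y = -1 then -1 else y + 1)) := by
        rw [List.map_map]
        exact List.map_congr_left hshift
      have hcases : ∀ y ∈ ['a','e','i','o','u'].map (fun v => pvFirstIdx t v),
          y = -1 ∨ 0 ≤ y := by
        intro y hy
        rcases List.mem_map.mp hy with ⟨v, _, rfl⟩
        exact pvFirstIdx_cases t v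
      unfold pvAltL
      rw [hmap, pv_filter_shift _ hcases, pv_min?_map_add_one]
      have hAcons : pvGoA (c :: t) = 1 + pvGoA t := by simp [pvGoA, hv]
      rw [hAcons, ← ih]
      unfold pvAltL
      rcases hmin : PySem.List.min?
          ((['a','e','i','o','u'].map (fun v => pvFirstIdx t v)).filter
            (fun i => decide (0 ≤ i))) (fun x => x) with _ | m
      · simp only [Option.map_none]
        simp only [List.length_cons]
        push_cast; ring
      · simp only [Option.map_some]
        ring

theorem pv_alt_eq_altL (word : String) :
    index_of_left_most_vowel_alt word = pvAltL word.toList := by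
  unfold index_of_left_most_vowel_alt pvAltL
  have hfind : ∀ v : Char, PySem.Str.find word (String.ofList [v]) = pvFirstIdx word.toList v := by
    intro v
    rw [PySem.Str.find_eq, String.toList_ofList]
    exact pv_find_single word.toList v
  simp only [hfind, PySem.Str.len_eq]

-- ===== VERDICT (by name: the statement is the Claim_ definition above) =====
theorem index_of_left_most_vowel_spec : Claim_equal_index_of_left_most_vowel := by
  intro word _
  unfold Spec_index_of_left_most_vowel index_of_left_most_vowel
  rw [pv_alt_eq_altL, pv_altL_eq_goA]
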